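-- pv_equiv track=rewrite | github.com/yeastgenome/PatmatchDocker | www/app/pattern_converter.py | _extract_repeat_pattern
-- ===== SOURCE A (Python) =====
-- def _extract_repeat_pattern(chars: list) -> str:
--     """Extract the pattern to be repeated from chars."""
--     if not chars:
--         return ''
--
--     char = chars.pop()
--
--     if char in (')', ']'):
--         # It's a grouped pattern - need to find the matching opener
--         bracket_stack = [char]
--         left_bracket = '(' if char == ')' else '['
--         right_bracket = char
--         repeat = [char]
--
--         while bracket_stack and chars:
--             char = chars.pop()
--             repeat.insert(0, char)
--             if char == right_bracket:
--                 bracket_stack.append(char)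
--             elif char == left_bracket:
--                 bracket_stack.pop()
--
--         return ''.join(repeat)
--     else:
--         return char
-- ===== SOURCE B (Python) =====
-- def _extract_repeat_pattern(chars: list) -> str:
--     """Extract the pattern to be repeated from chars."""
--     if not chars:
--         return ''
--
--     char = chars.pop()
--
--     if char not in (')', ']'):
--         return char
--
--     opener = '(' if char == ')' else '['
--     depth = 1
--     i = len(chars)
--     while i > 0 and depth > 0:
--         i -= 1
--         c = chars[i]
--         if c == char:
--             depth += 1
--         elif c == opener:
--             depth -= 1
--
--     result = ''.join(chars[i:]) + char
--     del chars[i:]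
--     return result
-- ===== Notes on version B (the rewrite author's own statement) =====
-- stated objective: simpler
-- what changed: Replaces the pop-and-prepend loop with an explicit list stack by a backward index scan with an integer depth counter, then builds the result in one step from the list slice chars[i:] and removes that suffix with del.
import Mathlib
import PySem

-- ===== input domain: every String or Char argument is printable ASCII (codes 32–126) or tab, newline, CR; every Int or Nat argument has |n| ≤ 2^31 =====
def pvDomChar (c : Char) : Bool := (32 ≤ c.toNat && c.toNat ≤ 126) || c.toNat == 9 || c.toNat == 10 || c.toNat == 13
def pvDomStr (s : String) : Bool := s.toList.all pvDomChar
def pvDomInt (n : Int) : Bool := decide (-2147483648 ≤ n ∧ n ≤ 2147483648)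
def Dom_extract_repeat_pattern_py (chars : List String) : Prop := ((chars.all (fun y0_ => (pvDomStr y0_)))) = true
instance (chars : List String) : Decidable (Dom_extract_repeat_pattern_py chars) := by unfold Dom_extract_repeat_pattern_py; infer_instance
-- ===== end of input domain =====

-- B replaces A's explicit bracket stack and pop-and-prepend loop by a backward depth-counter
-- scan plus one slice; the proof is about the RETURN value only (both Pythons consume the same
-- suffix of the mutable argument).

-- ===== PORT A =====
-- A's while loop: state = (bracket_stack, remaining chars reversed, repeat list); pops from the
-- end of chars = walks rem (the reversed prefix) front to back.
def extractLoopA (left right : String) : List String → List String → List String → List String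
  | [], _, rep => rep
  | _ :: _, [], rep => rep
  | s :: ss, c :: cs, rep =>
    extractLoopA left right
      (if c = right then c :: s :: ss else if c = left then ss else s :: ss)
      cs (c :: rep)

def extract_repeat_pattern_py (chars : List String) : String :=
  match chars.getLast? with
  | none => ""
  | some char =>
    let rest := chars.dropLast
    if char = ")" ∨ char = "]" then
      let left : String := if char = ")" then "(" else "["
      PySem.Str.join "" (extractLoopA left char [char] rest.reverse [char])
    else char

-- ===== PORT B =====
-- B's while loop: walks backward from the end with an integer depth counter; returns how many
-- elements of the (reversed) prefix are consumed.
def altScan (closer opener : String) : List String → Nat → Nat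
  | [], _ => 0
  | c :: cs, depth =>
    if depth = 0 then 0
    else 1 + altScan closer opener cs
      (if c = closer then depth + 1 else if c = opener then depth - 1 else depth)

def extract_repeat_pattern_py_alt (chars : List String) : String :=
  match chars.getLast? with
  | none => ""
  | some char =>
    let rest := chars.dropLast
    if char = ")" ∨ char = "]" then
      let opener : String := if char = ")" then "(" else "["
      let k := altScan char opener rest.reverse 1
      PySem.Str.join "" (rest.drop (rest.length - k)) ++ char
    else char

-- ===== PRECONDITION & SPEC =====
def Spec_extract_repeat_pattern_py (chars : List String) (out : String) : Prop := out = extract_repeat_pattern_py_alt chars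
instance (chars : List String) (out : String) : Decidable (Spec_extract_repeat_pattern_py chars out) := by unfold Spec_extract_repeat_pattern_py; infer_instance

-- ===== CLAIM (what is proved, stated in full; the proofs are below) =====
def Claim_equal_extract_repeat_pattern_py : Prop := ∀ (chars : List String), Dom_extract_repeat_pattern_py chars → Spec_extract_repeat_pattern_py chars (extract_repeat_pattern_py chars)

-- ===== LEMMAS AND PROOFS =====
theorem extractLoopA_eq (left right : String) (rem : List String) (stack rep : List String) :
    extractLoopA left right stack rem rep =
      (rem.take (altScan right left rem stack.length)).reverse ++ rep := by
  induction rem generalizing stack rep with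
  | nil => cases stack <;> simp [extractLoopA, altScan]
  | cons c cs ih =>
    cases stack with
    | nil => simp [extractLoopA, altScan]
    | cons s ss =>
      simp only [extractLoopA, altScan, List.length_cons, Nat.succ_ne_zero, if_false, ih]
      have hlen : (if c = right then c :: s :: ss else if c = left then ss else s :: ss).length
          = (if c = right then ss.length + 1 + 1 else if c = left then ss.length + 1 - 1
             else ss.length + 1) := by
        split_ifs <;> simp
      rw [hlen]
      rw [Nat.add_comm 1]
      split_ifs <;> simp [List.take_succ_cons]

theorem join_nil_flatten (ls : List (List Char)) :
    PySem.Chars.join [] ls = ls.flatten := by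
  induction ls with
  | nil => simp [PySem.Chars.join, List.intercalate]
  | cons a t ih =>
    cases t with
    | nil => simp [PySem.Chars.join, List.intercalate]
    | cons b u => rw [PySem.Chars.join_cons_cons, ih]; simp

theorem join_append_singleton (l : List String) (c : String) :
    PySem.Str.join "" (l ++ [c]) = PySem.Str.join "" l ++ c := by
  simp [PySem.Str.join, join_nil_flatten]

theorem reverse_take_reverse {α : Type} (l : List α) (k : Nat) :
    (l.reverse.take k).reverse = l.drop (l.length - k) := by
  rw [← List.rtake_eq_reverse_take_reverse, List.rtake]

-- ===== VERDICT (by name: the statement is the Claim_ definition above) =====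
theorem extract_repeat_pattern_py_spec : Claim_equal_extract_repeat_pattern_py := by
  intro chars _
  unfold Spec_extract_repeat_pattern_py extract_repeat_pattern_py extract_repeat_pattern_py_alt
  cases hlast : chars.getLast? with
  | none => rfl
  | some char =>
    simp only
    split
    · next hbr =>
      rw [extractLoopA_eq]
      simp only [List.length_cons, List.length_nil, Nat.zero_add]
      rw [reverse_take_reverse, join_append_singleton]
    · rfl
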